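-- pv_equiv track=rewrite | github.com/MrOooooo/wood-defect-detection | wood-defect-2/models/fdm.py | _find_valid_num_groups
-- ===== SOURCE A (Python) =====
-- def _find_valid_num_groups(feature_dim, desired_groups):
--     """
--     找到能整除feature_dim的最接近desired_groups的数
--     """
--     # 如果desired_groups能整除，直接返回
--     if feature_dim % desired_groups == 0:
--         return desired_groups
--
--     # 否则找最接近的因数
--     best_groups = 1
--     min_diff = abs(desired_groups - 1)
--
--     # 从desired_groups向下搜索
--     for g in range(desired_groups, 0, -1):
--         if feature_dim % g == 0:
--             if abs(g - desired_groups) < min_diff: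
--                 best_groups = g
--                 min_diff = abs(g - desired_groups)
--             break
--
--     # 也向上搜索一下
--     for g in range(desired_groups + 1, feature_dim + 1):
--         if feature_dim % g == 0:
--             if abs(g - desired_groups) < min_diff:
--                 best_groups = g
--             break
--
--     return best_groups
-- ===== SOURCE B (Python) =====
-- def _find_valid_num_groups(feature_dim, desired_groups):
--     # exact division: desired_groups itself is the answer
--     if feature_dim % desired_groups == 0:
--         return desired_groups
--     # otherwise enumerate divisor pairs (d, feature_dim // d) by trial division up
--     # to sqrt(feature_dim); keep the divisor nearest to desired_groups, ties to the smaller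
--     best = 1
--     d = 1
--     while d * d <= feature_dim:
--         if feature_dim % d == 0:
--             for g in (d, feature_dim // d):
--                 if abs(g - desired_groups) < abs(best - desired_groups) or (
--                     abs(g - desired_groups) == abs(best - desired_groups) and g < best
--                 ):
--                     best = g
--         d += 1
--     return best
-- ===== Notes on version B (the rewrite author's own statement) =====
-- stated objective: faster
-- what changed: B keeps the exact-division fast path but replaces A's two linear scans (down over range(desired_groups,0,-1) and up over range(desired_groups+1, feature_dim+1)) by one trial-division loop to sqrt(feature_dim) that enumerates divisor pairs (d, feature_dim//d) and keeps the divisor nearest to desired_groups, ties to the smaller.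
-- outside the precondition, e.g. on _find_valid_num_groups(6, -10): A returns -6, B returns 1; on _find_valid_num_groups(-6, 4): A returns 3, B returns 1; on _find_valid_num_groups(6, 0): A raises ZeroDivisionError, B raises ZeroDivisionError
import Mathlib
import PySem

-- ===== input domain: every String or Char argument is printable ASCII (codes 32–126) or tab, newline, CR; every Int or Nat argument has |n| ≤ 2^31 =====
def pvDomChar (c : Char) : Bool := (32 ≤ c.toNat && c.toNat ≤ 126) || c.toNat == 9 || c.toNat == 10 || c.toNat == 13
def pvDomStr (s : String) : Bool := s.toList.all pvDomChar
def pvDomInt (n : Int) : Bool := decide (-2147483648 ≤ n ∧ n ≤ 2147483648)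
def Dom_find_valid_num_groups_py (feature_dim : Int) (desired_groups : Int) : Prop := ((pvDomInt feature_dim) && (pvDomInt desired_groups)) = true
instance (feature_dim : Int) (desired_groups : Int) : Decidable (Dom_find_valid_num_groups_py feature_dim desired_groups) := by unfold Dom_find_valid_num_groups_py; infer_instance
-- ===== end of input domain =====

-- B keeps the exact-division fast path but enumerates divisors in pairs by trial division
-- up to sqrt(feature_dim) instead of A's linear scans over candidate group counts:
-- objective = faster (measured).

-- ===== PORT A =====
-- literal transliteration of _find_valid_num_groups: early return on divisibility,
-- then a downward break-at-first-divisor scan, then an upward one.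
def find_valid_num_groups_py (feature_dim : Int) (desired_groups : Int) : Int :=
  if PySem.Int.mod feature_dim desired_groups = 0 then desired_groups
  else
    let best0 : Int := 1
    let minDiff0 : Int := |desired_groups - 1|
    -- 'for g in range(desired_groups, 0, -1): if feature_dim % g == 0: …; break'
    let p := match (PySem.List.pyRange desired_groups 0 (-1)).find?
                (fun g => PySem.Int.mod feature_dim g == 0) with
      | some g =>
          if |g - desired_groups| < minDiff0 then (g, |g - desired_groups|)
          else (best0, minDiff0)
      | none => (best0, minDiff0)
    -- 'for g in range(desired_groups + 1, feature_dim + 1): if feature_dim % g == 0: …; break'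
    match (PySem.List.pyRange (desired_groups + 1) (feature_dim + 1) 1).find?
        (fun g => PySem.Int.mod feature_dim g == 0) with
    | some g => if |g - desired_groups| < p.2 then g else p.1
    | none => p.1

-- ===== PORT B =====
-- 'if abs(g - dg) < abs(best - dg) or (abs(g - dg) == abs(best - dg) and g < best): best = g'
def altPick (dg best g : Int) : Int :=
  if |g - dg| < |best - dg| ∨ (|g - dg| = |best - dg| ∧ g < best) then g else best

-- the 'while d * d <= feature_dim' loop of Source B
def altLoop (feature_dim desired_groups : Int) (d : Nat) (best : Int) : Int :=
  if h : (d : Int) * (d : Int) ≤ feature_dim then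
    let best' :=
      if PySem.Int.mod feature_dim (d : Int) = 0 then
        altPick desired_groups (altPick desired_groups best (d : Int))
          (PySem.Int.floordiv feature_dim (d : Int))
      else best
    altLoop feature_dim desired_groups (d + 1) best'
  else best
  termination_by feature_dim.toNat + 1 - d
  decreasing_by
    have hd : (d : Int) ≤ (d : Int) * (d : Int) := by nlinarith [Int.natCast_nonneg d]
    have : (d : Int) ≤ feature_dim := le_trans hd h
    omega

def find_valid_num_groups_py_alt (feature_dim : Int) (desired_groups : Int) : Int :=
  if PySem.Int.mod feature_dim desired_groups = 0 then desired_groups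
  else altLoop feature_dim desired_groups 1 1

-- ===== PRECONDITION & SPEC =====
-- Pre_ admits the function's natural domain (positive feature dimension and positive requested
-- group count) plus every input where desired_groups divides feature_dim exactly; outside it A
-- raises ZeroDivisionError (desired_groups = 0) or returns accidental non-positive "group
-- counts" produced by its scans over negative candidate ranges (see cites).
def Pre_find_valid_num_groups_py (feature_dim : Int) (desired_groups : Int) : Prop :=
  desired_groups ≠ 0 ∧ (desired_groups ∣ feature_dim ∨ (1 ≤ feature_dim ∧ 1 ≤ desired_groups))
instance (feature_dim : Int) (desired_groups : Int) : Decidable (Pre_find_valid_num_groups_py feature_dim desired_groups) := by unfold Pre_find_valid_num_groups_py; infer_instance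

def pvWitness_find_valid_num_groups_py : Int × Int := (12, 5)

def Spec_find_valid_num_groups_py (feature_dim : Int) (desired_groups : Int) (out : Int) : Prop := out = find_valid_num_groups_py_alt feature_dim desired_groups
instance (feature_dim : Int) (desired_groups : Int) (out : Int) : Decidable (Spec_find_valid_num_groups_py feature_dim desired_groups out) := by unfold Spec_find_valid_num_groups_py; infer_instance

-- ===== CLAIM (what is proved, stated in full; the proofs are below) =====
def Claim_equal_find_valid_num_groups_py : Prop := ∀ (feature_dim : Int) (desired_groups : Int), Dom_find_valid_num_groups_py feature_dim desired_groups → Pre_find_valid_num_groups_py feature_dim desired_groups → Spec_find_valid_num_groups_py feature_dim desired_groups (find_valid_num_groups_py feature_dim desired_groups)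

-- ===== LEMMAS AND PROOFS =====

-- strict "closer to dg, ties to the smaller" order used by both proofs
def Better (dg g b : Int) : Prop :=
  (g - dg).natAbs < (b - dg).natAbs ∨ ((g - dg).natAbs = (b - dg).natAbs ∧ g < b)

-- the unique optimum both programs compute
def Opt (fd dg r : Int) : Prop :=
  (1 ≤ r ∧ r ∣ fd) ∧ ∀ g, 1 ≤ g → g ∣ fd → ¬ Better dg g r

lemma better_abs {dg g b : Int} :
    (|g - dg| < |b - dg| ∨ (|g - dg| = |b - dg| ∧ g < b)) ↔ Better dg g b := by
  unfold Better
  rw [Int.abs_eq_natAbs, Int.abs_eq_natAbs]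
  omega

lemma opt_unique {fd dg r1 r2 : Int} (h1 : Opt fd dg r1) (h2 : Opt fd dg r2) : r1 = r2 := by
  obtain ⟨⟨hr1, hd1⟩, hm1⟩ := h1
  obtain ⟨⟨hr2, hd2⟩, hm2⟩ := h2
  have n1 := hm1 r2 hr2 hd2
  have n2 := hm2 r1 hr1 hd1
  unfold Better at n1 n2
  omega

-- ---- B side ----

-- the list of candidates Source B's loop examines from counter value d on
def candList (fd : Int) (d : Nat) : List Int :=
  if h : (d : Int) * (d : Int) ≤ fd then
    (if PySem.Int.mod fd (d : Int) = 0 then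
        [(d : Int), PySem.Int.floordiv fd (d : Int)] else []) ++ candList fd (d + 1)
  else []
  termination_by fd.toNat + 1 - d
  decreasing_by
    have hd : (d : Int) ≤ (d : Int) * (d : Int) := by nlinarith [Int.natCast_nonneg d]
    have : (d : Int) ≤ fd := le_trans hd h
    omega

lemma altLoop_eq_foldl (fd dg : Int) (d : Nat) (best : Int) :
    altLoop fd dg d best = (candList fd d).foldl (altPick dg) best := by
  fun_induction altLoop fd dg d best with
  | case1 d best h b' ih =>
      rw [candList, dif_pos h, List.foldl_append, ih]
      congr 1
      by_cases hm : PySem.Int.mod fd (d:Int) = 0 <;>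
        simp [b', hm, altPick, List.foldl]
  | case2 d best h =>
      rw [candList]
      simp [h]

lemma altPick_eq (dg b a : Int) :
    (Better dg a b ∧ altPick dg b a = a) ∨ (¬ Better dg a b ∧ altPick dg b a = b) := by
  unfold altPick
  rcases iff_iff_implies_and_implies.mp (better_abs (dg := dg) (g := a) (b := b)) with ⟨h1, h2⟩
  split <;> [exact Or.inl ⟨h1 ‹_›, rfl⟩; exact Or.inr ⟨fun hb => ‹¬_› (h2 hb), rfl⟩]

lemma foldl_pick_spec (dg : Int) (l : List Int) (b : Int) :
    (l.foldl (altPick dg) b = b ∨ l.foldl (altPick dg) b ∈ l) ∧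
    (∀ x, (x = b ∨ x ∈ l) → ¬ Better dg x (l.foldl (altPick dg) b)) := by
  induction l generalizing b with
  | nil =>
      constructor
      · exact Or.inl rfl
      · rintro x (rfl | hx)
        · simp only [List.foldl_nil]; unfold Better; omega
        · simp at hx
  | cons a l ih =>
      obtain ⟨ihm, ihmin⟩ := ih (altPick dg b a)
      rcases altPick_eq dg b a with ⟨hcond, heq⟩ | ⟨hcond, heq⟩ <;>
        simp only [List.foldl_cons, heq] at ihm ihmin ⊢
      · constructor
        · rcases ihm with h | h
          · exact Or.inr (by simp [h])
          · exact Or.inr (by simp [h])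
        · rintro x (rfl | hx)
          · -- x = b, b' = a, Better a b
            intro hbr
            exact ihmin a (Or.inl rfl) (by unfold Better at *; omega)
          · rcases List.mem_cons.mp hx with rfl | hx
            · exact ihmin x (Or.inl rfl)
            · exact ihmin x (Or.inr hx)
      · constructor
        · rcases ihm with h | h
          · exact Or.inl h
          · exact Or.inr (by simp [h])
        · rintro x (rfl | hx)
          · exact ihmin x (Or.inl rfl)
          · rcases List.mem_cons.mp hx with rfl | hx
            · -- x = a, ¬Better a b
              intro har
              rcases (by unfold Better at *; omega :
                x = b ∨ Better dg b x) with rfl | hba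
              · exact ihmin x (Or.inl rfl) har
              · exact ihmin b (Or.inl rfl) (by unfold Better at *; omega)
            · exact ihmin x (Or.inr hx)

lemma mem_candList_div {fd : Int} {d : Nat} (hd : 1 ≤ d) {g : Int}
    (hg : g ∈ candList fd d) : 1 ≤ g ∧ g ∣ fd := by
  fun_induction candList fd d with
  | case1 d h ih =>
      rcases List.mem_append.mp hg with hmem | hmem
      · have hd0 : (0:Int) < (d:Int) := by exact_mod_cast hd
        split at hmem
        · have hdvd : (d:Int) ∣ fd := (PySem.Int.mod_eq_zero_iff_dvd fd (d:Int)).mp ‹_›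
          rw [PySem.Int.floordiv_eq_ediv_of_pos hd0] at hmem
          rcases List.mem_cons.mp hmem with rfl | hmem
          · exact ⟨by exact_mod_cast hd, hdvd⟩
          · rcases List.mem_cons.mp hmem with rfl | hmem
            · refine ⟨?_, ⟨(d:Int), (Int.ediv_mul_cancel hdvd).symm⟩⟩
              rw [Int.le_ediv_iff_mul_le hd0]
              calc (1:Int) * d = d := one_mul _
                _ ≤ (d:Int) * d := by nlinarith
                _ ≤ fd := h
            · simp at hmem
        · simp at hmem
      · exact ih (by omega) hmem
  | case2 d h => simp at hg

lemma candList_mem_pair (fd m : Int) (hm1 : 1 ≤ m) (hmm : m * m ≤ fd)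
    (hmod : PySem.Int.mod fd m = 0) :
    ∀ (n d : Nat), 1 ≤ d → (d : Int) + n = m →
      m ∈ candList fd d ∧ PySem.Int.floordiv fd m ∈ candList fd d := by
  intro n
  induction n with
  | zero =>
      intro d hd1 hdm
      have hdm' : (d : Int) = m := by omega
      rw [candList, dif_pos (by rw [hdm']; exact hmm)]
      rw [hdm', if_pos hmod]
      simp
  | succ n ih =>
      intro d hd1 hdm
      have hdlt : (d : Int) < m := by omega
      have hcond : (d : Int) * (d : Int) ≤ fd := by nlinarith [Int.natCast_nonneg d]
      rw [candList, dif_pos hcond]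
      have := ih (d + 1) (by omega) (by push_cast; omega)
      exact ⟨List.mem_append_right _ this.1, List.mem_append_right _ this.2⟩

lemma mem_candList_of_div {fd g : Int} (hfd : 1 ≤ fd) (hg : 1 ≤ g) (hdvd : g ∣ fd) :
    g ∈ candList fd 1 := by
  obtain ⟨q, hq⟩ := hdvd
  have hg0 : (0:Int) < g := hg
  have hq1 : 1 ≤ q := by nlinarith
  have hdvd : g ∣ fd := ⟨q, hq⟩
  have hqdvd : q ∣ fd := ⟨g, by linarith [hq, mul_comm g q]⟩
  rcases le_or_gt g q with hle | hlt
  · -- m = g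
    have h1 := candList_mem_pair fd g hg (by nlinarith)
      ((PySem.Int.mod_eq_zero_iff_dvd fd g).mpr hdvd) (g - 1).toNat 1 le_rfl (by omega)
    exact h1.1
  · -- m = q, fd / q = g
    have h1 := candList_mem_pair fd q hq1 (by nlinarith)
      ((PySem.Int.mod_eq_zero_iff_dvd fd q).mpr hqdvd) (q - 1).toNat 1 le_rfl (by omega)
    have : PySem.Int.floordiv fd q = g := by
      rw [PySem.Int.floordiv_eq_ediv_of_pos (by omega : (0:Int) < q), hq, mul_comm g q,
        Int.mul_ediv_cancel_left _ (by omega : q ≠ 0)]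
    rw [← this]
    exact h1.2

lemma alt_opt {fd dg : Int} (hfd : 1 ≤ fd) :
    Opt fd dg (altLoop fd dg 1 1) := by
  rw [altLoop_eq_foldl]
  obtain ⟨hmem, hmin⟩ := foldl_pick_spec dg (candList fd 1) 1
  constructor
  · rcases hmem with h | h
    · rw [h]; exact ⟨le_rfl, one_dvd fd⟩
    · exact mem_candList_div le_rfl h
  · intro g hg1 hgd
    exact hmin g (Or.inr (mem_candList_of_div hfd hg1 hgd))

-- ---- A side ----

lemma find_down (fd : Int) (n : Nat) :
    ∃ lo, ((PySem.List.pyRange ((n : Int) + 1) 0 (-1)).find?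
            (fun g => PySem.Int.mod fd g == 0)) = some lo ∧
      1 ≤ lo ∧ lo ≤ (n : Int) + 1 ∧ lo ∣ fd ∧
      ∀ g, lo < g → g ≤ (n : Int) + 1 → ¬ g ∣ fd := by
  induction n with
  | zero =>
      refine ⟨1, ?_, le_rfl, by norm_num, one_dvd fd, by intro g h1 h2 _; omega⟩
      rw [PySem.List.pyRange_neg_one_cons (by norm_num), PySem.List.pyRange_neg_one_eq_nil (by norm_num)]
      simp [List.find?]
  | succ n ih =>
      rw [PySem.List.pyRange_neg_one_cons (by push_cast; omega)]
      by_cases hp : PySem.Int.mod fd ((n : Int) + 1 + 1) = 0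
      · refine ⟨(n : Int) + 1 + 1, ?_, by omega, by push_cast; omega,
          (PySem.Int.mod_eq_zero_iff_dvd fd _).mp hp, by intro g h1 h2 _; push_cast at *; omega⟩
        simp [List.find?, hp]
      · obtain ⟨lo, heq, h1, h2, h3, h4⟩ := ih
        refine ⟨lo, ?_, h1, by push_cast; omega, h3, ?_⟩
        · rw [List.find?_cons_of_neg (by simp [hp]),
            show (((n + 1 : Nat) : Int) + 1 - 1) = (n : Int) + 1 by push_cast; ring, heq]
        · intro g hg1 hg2 hdvd
          rcases lt_or_ge ((n : Int) + 1) g with hgt | hle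
          · have : g = (n : Int) + 1 + 1 := by push_cast at *; omega
            exact hp ((PySem.Int.mod_eq_zero_iff_dvd fd _).mpr (this ▸ hdvd))
          · exact h4 g hg1 hle hdvd

lemma find_up (p : Int → Bool) :
    ∀ (n : Nat) (c : Int),
      (∀ hi, ((PySem.List.pyRange c (c + (n : Int)) 1).find? p) = some hi →
        c ≤ hi ∧ hi < c + (n : Int) ∧ p hi = true ∧ ∀ g, c ≤ g → g < hi → p g = false) ∧
      (((PySem.List.pyRange c (c + (n : Int)) 1).find? p) = none →
        ∀ g, c ≤ g → g < c + (n : Int) → p g = false) := by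
  intro n
  induction n with
  | zero =>
      intro c
      rw [show c + ((0:Nat) : Int) = c by push_cast; ring, PySem.List.pyRange_one_eq_nil le_rfl]
      exact ⟨by intro hi h; simp at h, by intro _ g h1 h2; omega⟩
  | succ n ih =>
      intro c
      rw [PySem.List.pyRange_one_cons (by push_cast; omega)]
      have hrw : c + ((n + 1 : Nat) : Int) = (c + 1) + (n : Int) := by push_cast; ring
      by_cases hp : p c
      · rw [List.find?_cons_of_pos hp]
        refine ⟨?_, by intro h; simp at h⟩
        rintro hi h
        injection h with h; subst h
        exact ⟨le_rfl, by push_cast; omega, hp, by intro g h1 h2; omega⟩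
      · rw [List.find?_cons_of_neg (by simp [hp])]
        obtain ⟨ihs, ihn⟩ := ih (c + 1)
        rw [hrw]
        constructor
        · intro hi h
          obtain ⟨k1, k2, k3, k4⟩ := ihs hi h
          refine ⟨by omega, k2, k3, ?_⟩
          intro g hg1 hg2
          rcases eq_or_lt_of_le hg1 with rfl | hgt
          · simpa using hp
          · exact k4 g (by omega) hg2
        · intro h g hg1 hg2
          rcases eq_or_lt_of_le hg1 with rfl | hgt
          · simpa using hp
          · exact ihn h g (by omega) hg2

lemma a_opt {fd dg : Int} (hfd : 1 ≤ fd) (hdg : 1 ≤ dg) :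
    Opt fd dg (find_valid_num_groups_py fd dg) := by
  unfold find_valid_num_groups_py
  by_cases h0 : PySem.Int.mod fd dg = 0
  · rw [if_pos h0]
    refine ⟨⟨hdg, (PySem.Int.mod_eq_zero_iff_dvd fd dg).mp h0⟩, ?_⟩
    intro g hg1 hgd
    unfold Better
    omega
  · rw [if_neg h0]
    obtain ⟨lo, hfind, hlo1, hlo2, hlo3, hlo4⟩ := find_down fd (dg - 1).toNat
    have hcast : ((dg - 1).toNat : Int) + 1 = dg := by omega
    rw [hcast] at hfind hlo2 hlo4
    have hlodg : lo < dg := by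
      rcases eq_or_lt_of_le hlo2 with rfl | h
      · exact absurd ((PySem.Int.mod_eq_zero_iff_dvd fd lo).mpr hlo3) h0
      · exact h
    rw [hfind]
    dsimp only
    have hp2 : (if |lo - dg| < |dg - 1| then (lo, |lo - dg|) else ((1:Int), |dg - 1|))
        = (lo, dg - lo) := by
      have h1 : |lo - dg| = dg - lo := by rw [abs_of_nonpos (by omega : lo - dg ≤ 0)]; ring
      have h2 : |dg - 1| = dg - 1 := abs_of_nonneg (by omega)
      rw [h1, h2]
      split_ifs with h
      · rfl
      · simp only [Prod.mk.injEq]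
        constructor <;> omega
    rw [hp2]
    rcases hup : (PySem.List.pyRange (dg + 1) (fd + 1) 1).find?
        (fun g => PySem.Int.mod fd g == 0) with _ | hi
    · -- no divisor above dg
      show Opt fd dg lo
      have hnone : ∀ g, dg < g → g ≤ fd → ¬ g ∣ fd := by
        rcases le_or_gt dg fd with hle | hgt
        · rw [show fd + 1 = (dg + 1) + (((fd - dg).toNat : Int)) by omega] at hup
          have hn := (find_up (fun g => PySem.Int.mod fd g == 0) (fd - dg).toNat (dg + 1)).2 hup
          intro g hg1 hg2 hdvd
          have hpf := hn g (by omega) (by omega)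
          rw [(PySem.Int.mod_eq_zero_iff_dvd fd g).mpr hdvd] at hpf
          simp at hpf
        · intro g hg1 hg2 _
          omega
      refine ⟨⟨hlo1, hlo3⟩, ?_⟩
      intro g hg1 hgd
      have hgfd : g ≤ fd := Int.le_of_dvd (by omega) hgd
      have hglo : g ≤ lo := by
        by_contra hc
        push_neg at hc
        rcases le_or_gt g dg with h | h
        · exact hlo4 g hc h hgd
        · exact hnone g h hgfd hgd
      unfold Better
      omega
    · -- a divisor hi above dg was found
      show Opt fd dg (if |hi - dg| < dg - lo then hi else lo)
      have hdgfd : dg ≤ fd := by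
        by_contra hc
        rw [PySem.List.pyRange_one_eq_nil (by omega)] at hup
        simp at hup
      rw [show fd + 1 = (dg + 1) + (((fd - dg).toNat : Int)) by omega] at hup
      obtain ⟨k1, k2, k3, k4⟩ :=
        (find_up (fun g => PySem.Int.mod fd g == 0) (fd - dg).toNat (dg + 1)).1 hi hup
      have hhidvd : hi ∣ fd := by
        simp only [beq_iff_eq] at k3
        exact (PySem.Int.mod_eq_zero_iff_dvd fd hi).mp k3
      have hhimin : ∀ g, dg < g → g < hi → ¬ g ∣ fd := by
        intro g hg1 hg2 hdvd
        have hpf := k4 g (by omega) hg2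
        rw [(PySem.Int.mod_eq_zero_iff_dvd fd g).mpr hdvd] at hpf
        simp at hpf
      rw [abs_of_nonneg (by omega : (0:Int) ≤ hi - dg)]
      have key : ∀ g, 1 ≤ g → g ∣ fd → g ≤ lo ∨ hi ≤ g := by
        intro g hg1 hgd
        have hgfd : g ≤ fd := Int.le_of_dvd (by omega) hgd
        rcases le_or_gt g dg with h | h
        · left
          by_contra hc
          push_neg at hc
          exact hlo4 g hc h hgd
        · right
          by_contra hc
          push_neg at hc
          exact hhimin g h hc hgd
      split_ifs with hc
      · refine ⟨⟨by omega, hhidvd⟩, ?_⟩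
        intro g hg1 hgd
        rcases key g hg1 hgd with h | h <;> (unfold Better; omega)
      · refine ⟨⟨hlo1, hlo3⟩, ?_⟩
        intro g hg1 hgd
        rcases key g hg1 hgd with h | h <;> (unfold Better; omega)

-- ===== VERDICT (by name: the statement is the Claim_ definition above) =====
theorem find_valid_num_groups_py_spec : Claim_equal_find_valid_num_groups_py := by
  intro fd dg _ hpre
  unfold Spec_find_valid_num_groups_py
  by_cases h0 : PySem.Int.mod fd dg = 0
  · unfold find_valid_num_groups_py find_valid_num_groups_py_alt
    rw [if_pos h0, if_pos h0]
  · obtain ⟨hdg0, hdvd | ⟨hfd, hdg⟩⟩ := hpre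
    · exact absurd ((PySem.Int.mod_eq_zero_iff_dvd fd dg).mpr hdvd) h0
    · have halt : find_valid_num_groups_py_alt fd dg = altLoop fd dg 1 1 := by
        unfold find_valid_num_groups_py_alt
        rw [if_neg h0]
      rw [halt]
      exact opt_unique (a_opt hfd hdg) (alt_opt hfd)
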